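-- pv_equiv track=rewrite | github.com/jmerizia/google_foobar | foo2.py | answer
-- ===== SOURCE A (Python) =====
-- def answer(x):
--     # This one sounds fun!!
--     # I wonder if the Google team is reading my comments...
--     # I would go out and learn to do a backflip like immediately
--     # Goal: Take length of string and narrow it down
--     # then take length again
--     # BTW I showered & watched a movie between writing this.
--     # That's why it took so long.
--     new_list = []
--     total = len(x)
--     while x != []:
--         a = x[0]
--         b = x[0][::-1]
--         new_list.append(a)
--         x = [value for value in x if value != a]
--         x = [value for value in x if value != b]
--     return len(new_list)
-- ===== SOURCE B (Python) =====
-- def answer(x):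
--     # Count distinct {s, reverse(s)} classes: one pass, hashing each string's
--     # canonical representative min(s, s[::-1]) into a set.
--     return len({min(s, s[::-1]) for s in x})
-- ===== Notes on version B (the rewrite author's own statement) =====
-- stated objective: faster
-- what changed: Replaced the quadratic remove-the-head-and-its-reverse loop over the remaining list by a single pass that collects the canonical representative min(s, s[::-1]) of every string into a hash set and returns its size.
import Mathlib
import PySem

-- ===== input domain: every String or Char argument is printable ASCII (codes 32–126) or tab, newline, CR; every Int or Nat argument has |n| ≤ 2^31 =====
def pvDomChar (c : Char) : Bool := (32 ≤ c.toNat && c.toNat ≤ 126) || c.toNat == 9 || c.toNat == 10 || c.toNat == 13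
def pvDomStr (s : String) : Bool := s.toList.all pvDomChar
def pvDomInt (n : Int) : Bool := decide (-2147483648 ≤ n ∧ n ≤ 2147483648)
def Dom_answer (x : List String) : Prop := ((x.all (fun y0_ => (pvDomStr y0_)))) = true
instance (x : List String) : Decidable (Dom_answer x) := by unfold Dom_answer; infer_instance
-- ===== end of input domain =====

-- B replaces A's quadratic peel-off-one-group-per-pass loop by one pass over the list
-- collecting min(s, s[::-1]) into a set (objective: faster, asymptotic).

-- ===== PORT A =====
-- s[::-1] ; exact per PySem.Str.slice?_none_none_neg_one
def pyRev (s : String) : String := String.ofList s.toList.reverse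

-- A's while loop: new_list grows by x[0], x loses everything equal to x[0] or its reverse
def answerGo (x : List String) (new_list : List String) : List String :=
  match x with
  | [] => new_list
  | a :: t =>
    let b := pyRev a
    let x1 := (a :: t).filter (fun v => v ≠ a)
    let x2 := x1.filter (fun v => v ≠ b)
    answerGo x2 (new_list ++ [a])
termination_by x.length
decreasing_by
  have h2 : ((a :: t).filter (fun v => v ≠ a)).length ≤ t.length := by
    rw [List.filter_cons_of_neg (by simp)]
    exact List.length_filter_le _ t
  have h1 : (((a :: t).filter (fun v => v ≠ a)).filter (fun v => v ≠ pyRev a)).length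
      ≤ ((a :: t).filter (fun v => v ≠ a)).length := List.length_filter_le _ _
  simp only [List.length_cons]
  omega

def answer (x : List String) : Int :=
  ((answerGo x []).length : Int)

-- ===== PORT B =====
-- min(s, s[::-1]) (Python min of two strings: first argument on ties)
def canon (s : String) : String := if s ≤ pyRev s then s else pyRev s

def answer_alt (x : List String) : Int :=
  ((PySem.Set.ofList (x.map canon)).length : Int)

-- ===== PRECONDITION & SPEC =====
def Spec_answer (x : List String) (out : Int) : Prop := out = answer_alt x
instance (x : List String) (out : Int) : Decidable (Spec_answer x out) := by unfold Spec_answer; infer_instance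

-- ===== CLAIM (what is proved, stated in full; the proofs are below) =====
def Claim_equal_answer : Prop := ∀ (x : List String), Dom_answer x → Spec_answer x (answer x)

-- ===== LEMMAS AND PROOFS =====

theorem pyRev_pyRev (s : String) : pyRev (pyRev s) = s := by
  simp [pyRev]

theorem canon_rev (a : String) : canon (pyRev a) = canon a := by
  unfold canon
  rw [pyRev_pyRev]
  by_cases h1 : pyRev a ≤ a <;> by_cases h2 : a ≤ pyRev a
  · rw [if_pos h1, if_pos h2]
    exact le_antisymm h1 h2
  · rw [if_pos h1, if_neg h2]
  · rw [if_neg h1, if_pos h2]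
  · exact absurd (le_total a (pyRev a)) (by simp [h1, h2])

theorem canon_eq_iff (v a : String) : canon v = canon a ↔ (v = a ∨ v = pyRev a) := by
  constructor
  · intro h
    unfold canon at h
    split_ifs at h with hv ha ha
    · exact Or.inl h
    · exact Or.inr h
    · refine Or.inr ?_
      have := congrArg pyRev h
      rwa [pyRev_pyRev] at this
    · refine Or.inl ?_
      have := congrArg pyRev h
      rwa [pyRev_pyRev, pyRev_pyRev] at this
  · rintro (rfl | rfl)
    · rfl
    · exact canon_rev a

-- A's two filters remove exactly the canonical class of the head
theorem filter_step (a : String) (t : List String) :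
    ((a :: t).filter (fun v => v ≠ a)).filter (fun v => v ≠ pyRev a)
      = t.filter (fun v => canon v ≠ canon a) := by
  rw [List.filter_filter, List.filter_cons_of_neg (by simp)]
  apply List.filter_congr
  intro v _
  by_cases h : canon v = canon a
  · rcases (canon_eq_iff v a).mp h with rfl | rfl <;> simp [h]
  · have h1 : v ≠ a := fun hv => h (by rw [hv])
    have h2 : v ≠ pyRev a := fun hv => h ((canon_eq_iff v a).mpr (Or.inr hv))
    simp [h1, h2, h]

-- counting the distinct canonicals: peeling off one class
theorem ofList_cons_length {c : String} (m : List String) :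
    (PySem.Set.ofList (c :: m)).length
      = (PySem.Set.ofList (m.filter (fun v => v ≠ c))).length + 1 := by
  have hn1 : (PySem.Set.ofList (c :: m)).Nodup := PySem.Set.nodup_ofList _
  have hn2 : (c :: PySem.Set.ofList (m.filter (fun v => v ≠ c))).Nodup := by
    refine List.nodup_cons.mpr ⟨?_, PySem.Set.nodup_ofList _⟩
    intro hc
    have := (PySem.Set.mem_ofList _ _).mp hc
    have := List.of_mem_filter this
    simp at this
  have hperm : (PySem.Set.ofList (c :: m)).Perm
      (c :: PySem.Set.ofList (m.filter (fun v => v ≠ c))) := by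
    refine (List.perm_ext_iff_of_nodup hn1 hn2).mpr ?_
    intro y
    rw [PySem.Set.mem_ofList]
    simp only [List.mem_cons, PySem.Set.mem_ofList, List.mem_filter]
    by_cases hy : y = c
    · simp [hy]
    · simp [hy]
  have := hperm.length_eq
  simp only [List.length_cons] at this
  omega

theorem go_length (n : Nat) : ∀ (x : List String), x.length ≤ n → ∀ (nl : List String),
    (answerGo x nl).length = nl.length + (PySem.Set.ofList (x.map canon)).length := by
  induction n with
  | zero =>
    intro x hx nl
    have : x = [] := List.length_eq_zero_iff.mp (Nat.le_zero.mp hx)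
    subst this
    rw [answerGo.eq_def]; simp [PySem.Set.ofList]
  | succ n ih =>
    intro x hx nl
    match x with
    | [] => rw [answerGo.eq_def]; simp [PySem.Set.ofList]
    | a :: t =>
      rw [answerGo.eq_def]
      simp only
      rw [filter_step a t]
      have hlen : (t.filter (fun v => canon v ≠ canon a)).length ≤ n := by
        have := List.length_filter_le (fun v => decide (canon v ≠ canon a)) t
        simp only [List.length_cons] at hx
        omega
      rw [ih _ hlen]
      have hmap : (t.filter (fun v => canon v ≠ canon a)).map canon
          = (t.map canon).filter (fun c => c ≠ canon a) := by
        rw [List.filter_map]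
        congr 1
      rw [hmap]
      have := ofList_cons_length (c := canon a) (t.map canon)
      simp only [List.map_cons]
      simp [this]
      omega

-- ===== VERDICT (by name: the statement is the Claim_ definition above) =====
theorem answer_spec : Claim_equal_answer := by
  intro x _
  unfold Spec_answer answer answer_alt
  rw [go_length x.length x le_rfl []]
  simp
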